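-- pv_equiv track=rewrite | github.com/alice-werefox/aoc-2025 | 02/main.py | find_divisors_and_comparisons
-- ===== SOURCE A (Python) =====
-- def find_divisors_and_comparisons(
--     product_id: int, repeats: int
-- ) -> list[tuple[int, int]]:
--     product_id_length = len(str(product_id))
--     divisors = []
--     if repeats != 0:
--         if product_id_length % repeats == 0:
--             divisor = int(product_id_length / repeats)
--             divisors.append((divisor, product_id % pow(10, divisor)))
--         return divisors
--     for i in range(1, int(product_id_length / 2) + 1):
--         if product_id_length % i == 0:
--             divisors.append((i, product_id % pow(10, i)))
--     return divisors
-- ===== SOURCE B (Python) =====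
-- def find_divisors_and_comparisons(
--     product_id: int, repeats: int
-- ) -> list[tuple[int, int]]:
--     n = len(str(product_id))
--     if repeats != 0:
--         if n % repeats == 0:
--             d = n // repeats
--             return [(d, product_id % 10 ** d)]
--         return []
--     # prime-factorize n, generate ALL its divisors multiplicatively,
--     # then keep the proper ones (<= n // 2) in ascending order
--     divs = [1]
--     m = n
--     p = 2
--     while p * p <= m:
--         if m % p == 0:
--             powers = [1]
--             while m % p == 0:
--                 m //= p
--                 powers.append(powers[-1] * p)
--             divs = [d * q for d in divs for q in powers]
--         p += 1
--     if m > 1: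
--         divs = [d * q for d in divs for q in (1, m)]
--     return [(d, product_id % 10 ** d) for d in sorted(divs) if d <= n // 2]
-- ===== Notes on version B (the rewrite author's own statement) =====
-- stated objective: alternative
-- what changed: For repeats == 0, B replaces A's ascending trial-division scan of candidates 1..n//2 by prime factorization of the digit count n: it factors n with a trial loop up to sqrt(n), generates all divisors multiplicatively from the prime powers, then sorts and keeps only the proper divisors d <= n//2 to build the result pairs.
-- outside the precondition, e.g. on find_divisors_and_comparisons(5, -1): A returns [(-1, 0.09999999999999973)], B returns [(-1, 0.09999999999999973)]
import Mathlib
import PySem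

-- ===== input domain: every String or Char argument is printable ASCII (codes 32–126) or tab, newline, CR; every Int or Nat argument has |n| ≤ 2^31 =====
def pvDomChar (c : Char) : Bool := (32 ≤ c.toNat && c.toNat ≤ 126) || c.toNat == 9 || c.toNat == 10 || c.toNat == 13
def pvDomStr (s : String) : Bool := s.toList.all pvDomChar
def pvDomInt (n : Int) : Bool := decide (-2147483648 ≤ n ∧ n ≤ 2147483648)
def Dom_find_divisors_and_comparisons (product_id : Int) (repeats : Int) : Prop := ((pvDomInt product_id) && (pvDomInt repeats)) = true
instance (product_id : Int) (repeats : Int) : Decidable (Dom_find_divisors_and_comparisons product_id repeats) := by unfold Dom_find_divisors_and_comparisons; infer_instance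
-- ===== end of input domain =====

-- B replaces A's ascending 1..n//2 divisibility scan by prime factorization of the digit
-- count followed by multiplicative divisor generation, sort and filter; alternative
-- algorithm, no speed claim.

-- ===== PORT A =====
def find_divisors_and_comparisons (product_id : Int) (repeats : Int) : List (Int × Int) :=
  let product_id_length : Int := PySem.Str.len (PySem.Int.toStr product_id)
  let divisors : List (Int × Int) := []
  if repeats ≠ 0 then
    if PySem.Int.mod product_id_length repeats = 0 then
      -- int(product_id_length / repeats) = truncdiv (exact: |operands| < 2^53 on Dom)
      let divisor := PySem.Int.truncdiv product_id_length repeats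
      -- pow(10, divisor): Python yields a float when divisor < 0; those inputs are outside Pre_
      divisors ++ [(divisor, PySem.Int.mod product_id ((10 : Int) ^ divisor.toNat))]
    else divisors
  else
    (PySem.List.pyRange 1 (PySem.Int.truncdiv product_id_length 2 + 1) 1).foldl
      (fun acc i =>
        if PySem.Int.mod product_id_length i = 0 then
          acc ++ [(i, PySem.Int.mod product_id ((10 : Int) ^ i.toNat))]
        else acc)
      divisors

-- ===== PORT B =====
-- inner 'while m % p == 0' loop of Source B; fuel m.toNat suffices since every division
-- shrinks a positive m by a factor ≥ 2 (p ≥ 2); powers[-1] via pyGet? (-1), never none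
-- because powers starts as [1] and only grows
def pvFactorInner (fuel : Nat) (p : Int) (m : Int) (powers : List Int) : Int × List Int :=
  match fuel with
  | 0 => (m, powers)
  | fuel + 1 =>
    if PySem.Int.mod m p = 0 then
      pvFactorInner fuel p (PySem.Int.floordiv m p)
        (powers ++ [((PySem.List.pyGet? powers (-1)).getD 0) * p])
    else (m, powers)

-- outer 'while p * p <= m' loop of Source B; fuel n.toNat + 2 suffices since p increments
-- each iteration starting from 2 and m never grows
def pvFactorOuter (fuel : Nat) (p : Int) (m : Int) (divs : List Int) : Int × List Int :=
  match fuel with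
  | 0 => (m, divs)
  | fuel + 1 =>
    if p * p ≤ m then
      if PySem.Int.mod m p = 0 then
        let r := pvFactorInner m.toNat p m [1]
        pvFactorOuter fuel (p + 1) r.1 (divs.flatMap (fun d => r.2.map (fun q => d * q)))
      else pvFactorOuter fuel (p + 1) m divs
    else (m, divs)

def find_divisors_and_comparisons_alt (product_id : Int) (repeats : Int) : List (Int × Int) :=
  let n : Int := PySem.Str.len (PySem.Int.toStr product_id)
  if repeats ≠ 0 then
    if PySem.Int.mod n repeats = 0 then
      let d := PySem.Int.floordiv n repeats
      -- 10 ** d: Python yields a float when d < 0; those inputs are outside Pre_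
      [(d, PySem.Int.mod product_id ((10 : Int) ^ d.toNat))]
    else []
  else
    let r := pvFactorOuter (n.toNat + 2) 2 n [1]
    let divs := if r.1 > 1 then r.2.flatMap (fun d => [1, r.1].map (fun q => d * q)) else r.2
    (PySem.List.sorted divs (fun d => d) false).filterMap
      (fun d =>
        if d ≤ PySem.Int.floordiv n 2 then
          some (d, PySem.Int.mod product_id ((10 : Int) ^ d.toNat))
        else none)

-- ===== PRECONDITION & SPEC =====
-- Pre_ excludes only negative repeats that divide len(str(product_id)): there the divisor is
-- negative, pow(10, divisor) is a Python float, and both A and B return a list containing a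
-- float — not a value of the declared type list[tuple[int, int]].
def Pre_find_divisors_and_comparisons (product_id : Int) (repeats : Int) : Prop :=
  0 ≤ repeats ∨ PySem.Int.mod (PySem.Str.len (PySem.Int.toStr product_id)) repeats ≠ 0
instance (product_id : Int) (repeats : Int) : Decidable (Pre_find_divisors_and_comparisons product_id repeats) := by unfold Pre_find_divisors_and_comparisons; infer_instance

def pvWitness_find_divisors_and_comparisons : Int × Int := (123456, 0)

def Spec_find_divisors_and_comparisons (product_id : Int) (repeats : Int) (out : List (Int × Int)) : Prop := out = find_divisors_and_comparisons_alt product_id repeats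
instance (product_id : Int) (repeats : Int) (out : List (Int × Int)) : Decidable (Spec_find_divisors_and_comparisons product_id repeats out) := by unfold Spec_find_divisors_and_comparisons; infer_instance

-- ===== CLAIM (what is proved, stated in full; the proofs are below) =====
def Claim_equal_find_divisors_and_comparisons : Prop := ∀ (product_id : Int) (repeats : Int), Dom_find_divisors_and_comparisons product_id repeats → Pre_find_divisors_and_comparisons product_id repeats → Spec_find_divisors_and_comparisons product_id repeats (find_divisors_and_comparisons product_id repeats)

-- ===== LEMMAS AND PROOFS =====

-- Nat.toDigits is never empty
theorem pv_toDigits_length_pos (b n : Nat) : 0 < (Nat.toDigits b n).length := by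
  show 0 < (Nat.toDigitsCore b (n + 1) n []).length
  simp only [Nat.toDigitsCore]
  split
  · simp
  · rw [Nat.toDigitsCore_lens_eq]
    omega

-- the decimal string of an int in [-2^31, 2^31] has between 1 and 11 characters
theorem pv_toStr_length_bounds (n : Int) (h1 : -2147483648 ≤ n) (h2 : n ≤ 2147483648) :
    1 ≤ (PySem.Int.toStr n).length ∧ (PySem.Int.toStr n).length ≤ 11 := by
  rw [← String.length_toList, PySem.Int.toList_toStr, PySem.Int.toChars]
  split
  · have hlt : n.natAbs < 10 ^ 10 := by
      have : n.natAbs ≤ 2147483648 := by omega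
      omega
    have := Nat.toDigits_length 10 n.natAbs 10 (by norm_num) hlt
    simp only [List.length_cons]
    omega
  · have hlt : n.toNat < 10 ^ 10 := by omega
    have h10 := Nat.toDigits_length 10 n.toNat 10 (by norm_num) hlt
    have h1 := pv_toDigits_length_pos 10 n.toNat
    omega

-- a foldl that appends 'g x' when 'p x' holds is map-after-filter
theorem pv_foldl_append_if {α β : Type} (p : α → Prop) [DecidablePred p] (g : α → β)
    (l : List α) (acc : List β) :
    (l.foldl (fun acc x => if p x then acc ++ [g x] else acc) acc)
      = acc ++ (l.filter (fun x => decide (p x))).map g := by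
  induction l generalizing acc with
  | nil => simp
  | cons x xs ih =>
      by_cases hx : p x <;> simp [hx, ih]

-- filterMap of an 'if p then some (g q) else none' body is map-after-filter
theorem pv_filterMap_if {α β : Type} (p : α → Prop) [DecidablePred p] (g : α → β) (l : List α) :
    (l.filterMap (fun q => if p q then some (g q) else none))
      = (l.filter (fun q => decide (p q))).map g := by
  induction l with
  | nil => rfl
  | cons x xs ih =>
      by_cases hx : p x <;> simp [hx, ih]

-- the divisor lists produced by the two pipelines coincide (checked per digit count)
theorem pv_div_lists (m : Nat) (h1 : 1 ≤ m) (h2 : m ≤ 11) :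
    (PySem.List.pyRange 1 (PySem.Int.truncdiv (m : Int) 2 + 1) 1).filter
        (fun i => decide (PySem.Int.mod (m : Int) i = 0))
      = (let r := pvFactorOuter ((m : Int).toNat + 2) 2 (m : Int) [1]
         let divs := if r.1 > 1 then r.2.flatMap (fun d => [1, r.1].map (fun q => d * q)) else r.2
         (PySem.List.sorted divs (fun d => d) false).filter
           (fun d => decide (d ≤ PySem.Int.floordiv (m : Int) 2))) := by
  interval_cases m <;> decide

-- ===== VERDICT (by name: the statement is the Claim_ definition above) =====
theorem find_divisors_and_comparisons_spec : Claim_equal_find_divisors_and_comparisons := by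
  intro product_id repeats hdom hpre
  unfold Spec_find_divisors_and_comparisons
  unfold find_divisors_and_comparisons find_divisors_and_comparisons_alt
  have hdom' : -2147483648 ≤ product_id ∧ product_id ≤ 2147483648 := by
    simp [Dom_find_divisors_and_comparisons, pvDomInt] at hdom
    exact ⟨hdom.1.1, hdom.1.2⟩
  obtain ⟨hm1, hm2⟩ := pv_toStr_length_bounds product_id hdom'.1 hdom'.2
  set m : Nat := (PySem.Int.toStr product_id).length with hm
  rw [PySem.Str.len_eq, String.length_toList, ← hm]
  by_cases hr : repeats = 0
  · subst hr
    simp only [ne_eq, not_true_eq_false, if_false]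
    rw [pv_foldl_append_if (fun i => PySem.Int.mod (m : Int) i = 0)
          (fun i => ((i : Int), PySem.Int.mod product_id ((10 : Int) ^ i.toNat)))]
    rw [pv_filterMap_if (fun d => d ≤ PySem.Int.floordiv (m : Int) 2)
          (fun d => ((d : Int), PySem.Int.mod product_id ((10 : Int) ^ d.toNat)))]
    rw [pv_div_lists m hm1 hm2]
    rfl
  · simp only [hr, ne_eq, not_false_eq_true, if_true]
    by_cases hmod : PySem.Int.mod (m : Int) repeats = 0
    · have hrpos : 0 < repeats := by
        rcases hpre with h | h
        · omega
        · rw [PySem.Str.len_eq, String.length_toList, ← hm] at h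
          exact absurd hmod h
      have htd : PySem.Int.truncdiv (m : Int) repeats = (m : Int) / repeats := by
        show ((m : Int)).tdiv repeats = _
        exact Int.tdiv_eq_ediv_of_nonneg (by positivity)
      rw [if_pos hmod, if_pos hmod, htd, PySem.Int.floordiv_eq_ediv_of_pos hrpos]
      rfl
    · rw [if_neg hmod, if_neg hmod]
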